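-- pv_equiv track=rewrite | github.com/dsc-sookmyung/2024-01-Algorithm-Study | 01-240319/YenaChoi00/C.py | solution
-- ===== SOURCE A (Python) =====
-- from itertools import combinations
--
-- def binary_search(target, case):
--     low = 0
--     high = len(case) - 1
--
--     while low <= high:
--         mid = (low + high) // 2
--
--         if case[mid] < target:
--             low = mid + 1
--         else:
--             high = mid - 1
--
--     return low
--
-- def simulate(case, dice, idx, now, out):
--     if idx == len(case):
--         out.append(now)
--         return
--
--     for d in dice[case[idx]]:
--         simulate(case, dice, idx + 1, now + d, out)
--
-- def solution(dice):
--     answer = []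
--
--     half = len(dice) // 2
--     selected_cases = list(combinations(list(range(len(dice))), half))
--
--     sum_cases = {}
--     for idx, case in enumerate(selected_cases):
--         out = []
--         simulate(case, dice, 0, 0, out)
--         out.sort()
--         sum_cases[idx] = out
--
--     bestest_sum = 0
--     for key, value in sum_cases.items():
--         now_case = value
--         other_case = sum_cases[len(selected_cases) - key - 1]
--
--         temp_sum = 0
--         for c in now_case:
--             temp_sum += binary_search(c, other_case)
--
--         if temp_sum > bestest_sum:
--             bestest_sum = temp_sum
--             best_case = selected_cases[key]
--             answer = list(map(lambda x: x + 1, sorted(best_case[:])))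
--
--     return answer
-- ===== SOURCE B (Python) =====
-- from itertools import combinations
--
-- def solution(dice):
--     n = len(dice)
--     cases = list(combinations(range(n), n // 2))
--     sums = []
--     for case in cases:
--         s = [0]
--         for i in case:
--             s = [x + f for x in s for f in dice[i]]
--         s.sort()
--         sums.append(s)
--     best, answer = 0, []
--     for case, mine, theirs in zip(cases, sums, reversed(sums)):
--         wins = 0
--         j = 0
--         for a in mine:
--             while j < len(theirs) and theirs[j] < a:
--                 j += 1
--             wins += j
--         if wins > best:
--             best = wins
--             answer = [i + 1 for i in case]
--     return answer
-- ===== Notes on version B (the rewrite author's own statement) =====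
-- stated objective: alternative
-- what changed: Replaces the recursive simulate/dict/per-element-binary-search pipeline by an iterative product fold, a plain list of sum arrays zipped with its reverse instead of a dict with index arithmetic, and a single two-pointer merge walk over the two sorted sum arrays instead of one binary search per element.
import Mathlib
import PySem

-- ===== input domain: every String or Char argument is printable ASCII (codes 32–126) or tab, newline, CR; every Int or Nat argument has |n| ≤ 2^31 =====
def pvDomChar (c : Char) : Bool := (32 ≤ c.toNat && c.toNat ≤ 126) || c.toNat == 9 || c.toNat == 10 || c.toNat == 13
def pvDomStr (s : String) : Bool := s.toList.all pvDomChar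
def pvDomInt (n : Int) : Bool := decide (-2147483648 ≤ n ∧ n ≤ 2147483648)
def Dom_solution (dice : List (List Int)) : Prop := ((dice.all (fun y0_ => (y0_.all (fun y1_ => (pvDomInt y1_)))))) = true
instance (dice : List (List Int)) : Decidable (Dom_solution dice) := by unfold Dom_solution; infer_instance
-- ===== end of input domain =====

-- B replaces A's recursive simulate / dict with index-mirror lookups / per-element binary search
-- by an iterative product fold, the sum-array list zipped with its reverse, and one two-pointer
-- merge walk per pair of sorted sum arrays (objective: alternative algorithm, same cost class).

-- ===== PORT A =====
-- the while-loop of binary_search, as recursion on the shrinking interval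
def bsGo (target : Int) (case : List Int) (low high : Int) : Int :=
  if h : low ≤ high then
    let mid := PySem.Int.floordiv (low + high) 2
    -- case[mid]: always in range on every call A makes (0 ≤ low ≤ mid ≤ high < len)
    if (PySem.List.pyGet? case mid).getD 0 < target then bsGo target case (mid + 1) high
    else bsGo target case low (mid - 1)
  else low
termination_by (high + 1 - low).toNat
decreasing_by
  · have := PySem.Int.floordiv_two_mid_bounds h; omega
  · have := PySem.Int.floordiv_two_mid_bounds h; omega

def binarySearch (target : Int) (case : List Int) : Int :=
  bsGo target case 0 (PySem.List.len case - 1)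

-- simulate's DFS: idx-recursion rendered as structural recursion on case[idx:]
def simulateGo (dice : List (List Int)) (rest : List Int) (now : Int) (out : List Int) : List Int :=
  match rest with
  | [] => out ++ [now]
  | i :: rs =>
      ((PySem.List.pyGet? dice i).getD []).foldl (fun acc d => simulateGo dice rs (now + d) acc) out

def solution (dice : List (List Int)) : List Int :=
  let half := dice.length / 2
  let selected := PySem.List.combinations (PySem.List.pyRange 0 (dice.length : Int) 1) half
  let sumCases : PySem.Dict Int (List Int) :=
    (PySem.List.enumerate selected 0).foldl
      (fun d p => d.insert p.1 (PySem.List.sorted (simulateGo dice p.2 0 []) (fun x => x) false))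
      PySem.Dict.empty
  let C : Int := (selected.length : Int)
  (sumCases.items.foldl
    (fun (st : Int × List Int) kv =>
      let other := (sumCases.get? (C - kv.1 - 1)).getD []   -- key always present
      let temp := kv.2.foldl (fun t c => t + binarySearch c other) 0
      if temp > st.1 then
        (temp, (PySem.List.sorted ((PySem.List.pyGet? selected kv.1).getD []) (fun x => x) false).map (· + 1))
      else st)
    (0, [])).2

-- ===== PORT B =====
-- the inner 'while j < len(theirs) and theirs[j] < a: j += 1'
def bumpJ (theirs : List Int) (a : Int) (j : Int) : Int :=
  if h : j < (theirs.length : Int) ∧ (PySem.List.pyGet? theirs j).getD 0 < a then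
    bumpJ theirs a (j + 1)
  else j
termination_by ((theirs.length : Int) - j).toNat
decreasing_by omega

def solution_alt (dice : List (List Int)) : List Int :=
  let n := dice.length
  let cases := PySem.List.combinations (PySem.List.pyRange 0 (n : Int) 1) (n / 2)
  let sums := cases.map (fun case =>
    PySem.List.sorted
      (case.foldl
        (fun s i => s.flatMap (fun x => ((PySem.List.pyGet? dice i).getD []).map (fun f => x + f)))
        [0])
      (fun x => x) false)
  ((cases.zip (sums.zip sums.reverse)).foldl
    (fun (st : Int × List Int) t =>
      let wj := t.2.1.foldl
        (fun (wj : Int × Int) a => let j' := bumpJ t.2.2 a wj.2; (wj.1 + j', j'))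
        ((0 : Int), (0 : Int))
      if wj.1 > st.1 then (wj.1, t.1.map (· + 1)) else st)
    (0, [])).2

-- ===== PRECONDITION & SPEC =====
def Spec_solution (dice : List (List Int)) (out : List Int) : Prop := out = solution_alt dice
instance (dice : List (List Int)) (out : List Int) : Decidable (Spec_solution dice out) := by unfold Spec_solution; infer_instance

-- ===== CLAIM (what is proved, stated in full; the proofs are below) =====
def Claim_equal_solution : Prop := ∀ (dice : List (List Int)), Dom_solution dice → Spec_solution dice (solution dice)


-- ===== LEMMAS AND PROOFS =====

-- abbreviation used throughout: the number of elements of xs strictly below t, as an Int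
def cpI (t : Int) (xs : List Int) : Int := (xs.countP (fun x => decide (x < t)) : Int)

-- in a nondecreasing list, the element at i is < t exactly when i is below the count of elements < t
theorem cpI_nonneg (t : Int) (xs : List Int) : 0 ≤ cpI t xs := Int.natCast_nonneg _

theorem idx_lt_countP {xs : List Int} (hs : xs.Pairwise (· ≤ ·)) (t : Int) :
    ∀ i (h : i < xs.length), (xs[i] < t ↔ (i : Int) < cpI t xs) := by
  induction xs with
  | nil => intro i h; simp at h
  | cons x rest ih =>
    have hrest := (List.pairwise_cons.mp hs).2
    have hhead := (List.pairwise_cons.mp hs).1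
    intro i h
    by_cases hx : x < t
    · have hcp : cpI t (x :: rest) = cpI t rest + 1 := by
        simp [cpI, hx]
      cases i with
      | zero => simpa [hx, hcp] using cpI_nonneg t rest
      | succ n =>
        simp only [List.getElem_cons_succ]
        rw [ih hrest n (by simpa using h)]
        rw [hcp]; push_cast; omega
    · have hall : ∀ y ∈ x :: rest, ¬ y < t := by
        intro y hy
        rcases List.mem_cons.mp hy with rfl | hy
        · exact hx
        · exact fun hlt => hx (lt_of_le_of_lt (hhead y hy) hlt)
      have hcp : cpI t (x :: rest) = 0 := by
        simp only [cpI]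
        norm_num [List.countP_eq_zero]
        exact ⟨not_lt.mp hx, fun a ha => not_lt.mp (hall a (List.mem_cons_of_mem _ ha))⟩
      rw [hcp]
      constructor
      · intro hlt; exact absurd hlt (hall _ (List.getElem_mem h))
      · intro hi; omega

theorem countP_le_len (t : Int) (xs : List Int) : cpI t xs ≤ (xs.length : Int) := by
  unfold cpI; exact_mod_cast List.countP_le_length



theorem cpI_mono {a b : Int} (h : a ≤ b) (xs : List Int) : cpI a xs ≤ cpI b xs := by
  have : xs.countP (fun x => decide (x < a)) ≤ xs.countP (fun x => decide (x < b)) := by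
    apply List.countP_mono_left
    intro x _ hx
    simp only [decide_eq_true_eq] at *
    omega
  unfold cpI; exact_mod_cast this

theorem bsGo_eq {xs : List Int} (hs : xs.Pairwise (· ≤ ·)) (t : Int) :
    ∀ low high : Int, 0 ≤ low → low ≤ cpI t xs → cpI t xs ≤ high + 1 →
      high < (xs.length : Int) → bsGo t xs low high = cpI t xs := by
  suffices H : ∀ n (low high : Int), (high + 1 - low).toNat ≤ n → 0 ≤ low → low ≤ cpI t xs →
      cpI t xs ≤ high + 1 → high < (xs.length : Int) → bsGo t xs low high = cpI t xs by
    exact fun low high h0 h1 h2 h3 => H _ low high le_rfl h0 h1 h2 h3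
  intro n
  induction n with
  | zero =>
    intro low high hn h0 h1 h2 h3
    rw [bsGo]
    simp only [show ¬ low ≤ high by omega, dite_false]
    omega
  | succ n ih =>
    intro low high hn h0 h1 h2 h3
    rw [bsGo]
    by_cases hlh : low ≤ high
    · simp only [hlh, dite_true]
      have hmid := PySem.Int.floordiv_two_mid_bounds hlh
      set mid := PySem.Int.floordiv (low + high) 2 with hm
      have hmid0 : 0 ≤ mid := by omega
      have hcast : ((mid.toNat : Nat) : Int) = mid := Int.toNat_of_nonneg hmid0
      have hmlen : mid.toNat < xs.length := by omega
      have hget : (PySem.List.pyGet? xs mid).getD 0 = xs[mid.toNat] := by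
        rw [PySem.List.pyGet?_eq_some_getElem xs hmid0 (by omega)]
        rfl
      have hchar := idx_lt_countP hs t mid.toNat hmlen
      rw [hcast] at hchar
      rw [hget]
      by_cases hv : xs[mid.toNat] < t
      · simp only [hv, if_true]
        exact ih (mid + 1) high (by omega) (by omega) (by have := hchar.mp hv; omega) h2 h3
      · simp only [hv, if_false]
        have hcp : cpI t xs ≤ mid := by
          by_contra hc
          exact hv (hchar.mpr (by omega))
        exact ih low (mid - 1) (by omega) h0 h1 (by omega) (by omega)
    · simp only [hlh, dite_false]
      omega

theorem binarySearch_eq {xs : List Int} (hs : xs.Pairwise (· ≤ ·)) (t : Int) :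
    binarySearch t xs = cpI t xs := by
  unfold binarySearch
  apply bsGo_eq hs t 0 ((xs.length : Int) - 1) le_rfl (cpI_nonneg t xs)
  · simpa using countP_le_len t xs
  · simp

theorem bumpJ_eq {xs : List Int} (hs : xs.Pairwise (· ≤ ·)) (a : Int) :
    ∀ j : Int, 0 ≤ j → j ≤ cpI a xs → bumpJ xs a j = cpI a xs := by
  suffices H : ∀ n (j : Int), ((xs.length : Int) - j).toNat ≤ n → 0 ≤ j → j ≤ cpI a xs →
      bumpJ xs a j = cpI a xs by
    exact fun j h0 h1 => H _ j le_rfl h0 h1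
  intro n
  induction n with
  | zero =>
    intro j hn h0 h1
    have hle : (xs.length : Int) ≤ j := by omega
    rw [bumpJ]
    have : ¬ (j < (xs.length : Int) ∧ (PySem.List.pyGet? xs j).getD 0 < a) := by
      intro h; omega
    simp only [this, dite_false]
    have := countP_le_len a xs
    omega
  | succ n ih =>
    intro j hn h0 h1
    rw [bumpJ]
    by_cases hc : j < (xs.length : Int) ∧ (PySem.List.pyGet? xs j).getD 0 < a
    · simp only [hc]
      have hjlen : j.toNat < xs.length := by omega
      have hcast : ((j.toNat : Nat) : Int) = j := Int.toNat_of_nonneg h0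
      have hget : (PySem.List.pyGet? xs j).getD 0 = xs[j.toNat] := by
        rw [PySem.List.pyGet?_eq_some_getElem xs h0 hc.1]
        rfl
      have hchar := idx_lt_countP hs a j.toNat hjlen
      rw [hcast] at hchar
      have hjcp : j < cpI a xs := hchar.mp (by rw [← hget]; exact hc.2)
      exact ih (j + 1) (by omega) (by omega) (by omega)
    · simp only [hc, dite_false]
      rcases not_and_or.mp hc with hlen | hlt
      · have := countP_le_len a xs; omega
      · have : ¬ j < cpI a xs := by
          intro hj
          by_cases hjl : j.toNat < xs.length
          · have hchar := idx_lt_countP hs a j.toNat hjl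
            rw [Int.toNat_of_nonneg h0] at hchar
            apply hlt
            rw [PySem.List.pyGet?_eq_some_getElem xs h0 (by omega)]
            simpa using hchar.mpr hj
          · have := countP_le_len a xs; omega
        omega

-- the two-pointer walk accumulates the sum of the strictly-less counts
theorem mergeFold_eq {theirs : List Int} (hst : theirs.Pairwise (· ≤ ·)) :
    ∀ (mine : List Int), mine.Pairwise (· ≤ ·) → ∀ (w j : Int), 0 ≤ j →
      (∀ a ∈ mine, j ≤ cpI a theirs) →
      (mine.foldl (fun (wj : Int × Int) a => let j' := bumpJ theirs a wj.2; (wj.1 + j', j'))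
        (w, j)).1 = w + (mine.map (fun a => cpI a theirs)).sum := by
  intro mine
  induction mine with
  | nil => intro _ w j _ _; simp
  | cons a rest ih =>
    intro hp w j h0 hcp
    have hrest := (List.pairwise_cons.mp hp).2
    have hhead := (List.pairwise_cons.mp hp).1
    simp only [List.foldl_cons]
    have hb : bumpJ theirs a j = cpI a theirs :=
      bumpJ_eq hst a j h0 (hcp a (List.mem_cons_self ..))
    rw [hb]
    rw [ih hrest (w + cpI a theirs) (cpI a theirs) (cpI_nonneg a theirs)
      (fun a2 ha2 => cpI_mono (hhead a2 ha2) theirs)]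
    simp [List.sum_cons]
    ring

-- the Cartesian sums A's simulate builds, as a structural definition
def prodF (dice : List (List Int)) : List Int → Int → List Int
  | [], now => [now]
  | i :: rs, now => ((PySem.List.pyGet? dice i).getD []).flatMap (fun d => prodF dice rs (now + d))

theorem simulateGo_eq (dice : List (List Int)) :
    ∀ rest now out, simulateGo dice rest now out = out ++ prodF dice rest now := by
  intro rest
  induction rest with
  | nil => intro now out; rfl
  | cons i rs ih =>
    intro now out
    show ((PySem.List.pyGet? dice i).getD []).foldl (fun acc d => simulateGo dice rs (now + d) acc) out
        = out ++ prodF dice (i :: rs) now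
    rw [PySem.List.foldl_congr_mem _ _ (fun acc d => acc ++ prodF dice rs (now + d)) _
      (fun acc x _ => ih (now + x) acc)]
    rw [PySem.List.foldl_append_eq_flatMap]
    rfl

theorem bfold_eq (dice : List (List Int)) :
    ∀ (case : List Int) (s : List Int),
      case.foldl (fun s i => s.flatMap (fun x => ((PySem.List.pyGet? dice i).getD []).map (fun f => x + f))) s
        = s.flatMap (fun x => prodF dice case x) := by
  intro case
  induction case with
  | nil => intro s; simp [prodF]
  | cons i rs ih =>
    intro s
    rw [List.foldl_cons, ih]
    rw [List.flatMap_assoc]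
    simp only [prodF, List.flatMap_map]

theorem enumerate_map_snd {α β : Type} (f : α → β) :
    ∀ (xs : List α) (s : Int),
      (PySem.List.enumerate xs s).map (fun p => (p.1, f p.2)) = PySem.List.enumerate (xs.map f) s := by
  intro xs
  induction xs with
  | nil => intro s; rfl
  | cons x rest ih => intro s; simp [PySem.List.enumerate_cons, ih]

theorem foldl_congr_idx {α β γ : Type} (f : γ → α → γ) (g : γ → β → γ) :
    ∀ (l1 : List α) (l2 : List β) (init : γ), l1.length = l2.length →
      (∀ k (h1 : k < l1.length) (h2 : k < l2.length) (s : γ), f s l1[k] = g s l2[k]) →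
      l1.foldl f init = l2.foldl g init := by
  intro l1
  induction l1 with
  | nil =>
    intro l2 init hlen _
    have : l2 = [] := List.eq_nil_of_length_eq_zero (by simpa using hlen.symm)
    simp [this]
  | cons a l1 ih =>
    intro l2 init hlen hk
    cases l2 with
    | nil => simp at hlen
    | cons b l2 =>
      simp only [List.foldl_cons]
      rw [show f init a = g init b from hk 0 (by simp) (by simp) init]
      exact ih l2 _ (by simpa using hlen)
        (fun k h1 h2 s => by simpa using hk (k + 1) (by simpa using Nat.succ_lt_succ h1) (by simpa using Nat.succ_lt_succ h2) s)

-- ===== proof-side abbreviations for the two programs' shared structure =====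
def pvValsA (dice cases : List (List Int)) : List (List Int) :=
  cases.map (fun c => PySem.List.sorted (simulateGo dice c 0 []) (fun x => x) false)

def pvValsB (dice cases : List (List Int)) : List (List Int) :=
  cases.map (fun case =>
    PySem.List.sorted
      (case.foldl
        (fun s i => s.flatMap (fun x => ((PySem.List.pyGet? dice i).getD []).map (fun f => x + f)))
        [0])
      (fun x => x) false)

def pvDictA (dice cases : List (List Int)) : PySem.Dict Int (List Int) :=
  (PySem.List.enumerate cases 0).foldl
    (fun d p => d.insert p.1 (PySem.List.sorted (simulateGo dice p.2 0 []) (fun x => x) false))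
    PySem.Dict.empty

theorem vals_eq (dice cases : List (List Int)) : pvValsB dice cases = pvValsA dice cases := by
  unfold pvValsA pvValsB
  apply List.map_congr_left
  intro c _
  rw [bfold_eq, simulateGo_eq]
  simp

theorem dictA_items (dice cases : List (List Int)) :
    (pvDictA dice cases).items = PySem.List.enumerate (pvValsA dice cases) 0 := by
  unfold pvDictA
  rw [PySem.Dict.items_foldl_insert_fresh (PySem.List.enumerate cases 0) (fun p => p.1)
    (fun p => PySem.List.sorted (simulateGo dice p.2 0 []) (fun x => x) false) PySem.Dict.empty
    (fun a _ => PySem.Dict.contains_empty a.1)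
    (by rw [PySem.List.map_fst_enumerate]; exact PySem.List.nodup_pyRange_one 0 (0 + cases.length))]
  rw [show (PySem.Dict.empty : PySem.Dict Int (List Int)).items = [] from rfl, List.nil_append,
    enumerate_map_snd (fun c => PySem.List.sorted (simulateGo dice c 0 []) (fun x => x) false)]
  rfl

theorem dictA_keys_nodup (dice cases : List (List Int)) : (pvDictA dice cases).keys.Nodup := by
  have : (pvDictA dice cases).keys = (pvDictA dice cases).items.map (fun p => p.1) := rfl
  rw [this, dictA_items, PySem.List.map_fst_enumerate]
  exact PySem.List.nodup_pyRange_one 0 (0 + (pvValsA dice cases).length)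

theorem dictA_get (dice cases : List (List Int)) (m : Nat) (hm : m < cases.length) :
    (pvDictA dice cases).get? (m : Int) = some ((pvValsA dice cases)[m]'(by simp [pvValsA]; omega)) := by
  apply PySem.Dict.get?_of_mem_items _ _ (dictA_keys_nodup dice cases)
  rw [dictA_items]
  apply (PySem.List.mem_enumerate_iff _ _ _).mpr
  exact ⟨m, by simp [pvValsA]; omega, by simp⟩

theorem core (dice cases : List (List Int)) (hcs : ∀ c ∈ cases, c.Pairwise (· < ·)) :
    ((pvDictA dice cases).items.foldl
      (fun (st : Int × List Int) kv =>
        let other := ((pvDictA dice cases).get? (((cases.length : Nat) : Int) - kv.1 - 1)).getD []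
        let temp := kv.2.foldl (fun t c => t + binarySearch c other) 0
        if temp > st.1 then
          (temp, (PySem.List.sorted ((PySem.List.pyGet? cases kv.1).getD []) (fun x => x) false).map (· + 1))
        else st)
      (0, [])).2
    = ((cases.zip ((pvValsB dice cases).zip (pvValsB dice cases).reverse)).foldl
        (fun (st : Int × List Int) t =>
          let wj := t.2.1.foldl
            (fun (wj : Int × Int) a => let j' := bumpJ t.2.2 a wj.2; (wj.1 + j', j'))
            ((0 : Int), (0 : Int))
          if wj.1 > st.1 then (wj.1, t.1.map (· + 1)) else st)
        (0, [])).2 := by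
  rw [vals_eq]
  apply congrArg Prod.snd
  rw [dictA_items]
  set vals := pvValsA dice cases with hv
  have hlenv : vals.length = cases.length := by simp [hv, pvValsA]
  have hsorted : ∀ m (h : m < vals.length), (vals[m]).Pairwise (· ≤ ·) := by
    intro m h
    have : vals[m] = PySem.List.sorted (simulateGo dice (cases[m]'(by omega)) 0 []) (fun x => x) false := by
      simp [hv, pvValsA]
    rw [this]
    exact PySem.List.sorted_pairwise _ _
  apply foldl_congr_idx
  · simp [PySem.List.length_enumerate, hlenv]
  · intro k h1 h2 st
    have hk : k < cases.length := by simpa [PySem.List.length_enumerate, hlenv] using h1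
    have hkv : k < vals.length := by omega
    have hkr : vals.length - 1 - k < vals.length := by omega
    -- element shapes
    rw [PySem.List.getElem_enumerate]
    rw [List.getElem_zip, List.getElem_zip, List.getElem_reverse]
    simp only [zero_add]
    -- the opponent list A looks up is the mirrored entry
    have hidx : ((cases.length : Nat) : Int) - (k : Int) - 1 = ((cases.length - 1 - k : Nat) : Int) := by
      omega
    have hother : ((pvDictA dice cases).get? (((cases.length : Nat) : Int) - (k : Int) - 1)).getD []
        = vals[vals.length - 1 - k]'hkr := by
      rw [hidx, dictA_get dice cases _ (by omega)]
      simp only [Option.getD_some]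
      congr 1
      omega
    -- A's per-element binary-search sum = B's merge-walk sum
    have hbs : (vals[k]'hkv).foldl
        (fun t c => t + binarySearch c (vals[vals.length - 1 - k]'hkr)) 0
        = ((vals[k]'hkv).map (fun a => cpI a (vals[vals.length - 1 - k]'hkr))).sum := by
      rw [PySem.List.foldl_add]
      rw [show (fun c => binarySearch c (vals[vals.length - 1 - k]'hkr))
          = fun a => cpI a (vals[vals.length - 1 - k]'hkr) from
        funext fun c => binarySearch_eq (hsorted _ hkr) c]
      ring
    have hmerge : ((vals[k]'hkv).foldl
        (fun (wj : Int × Int) a => (wj.1 + bumpJ (vals[vals.length - 1 - k]'hkr) a wj.2,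
          bumpJ (vals[vals.length - 1 - k]'hkr) a wj.2))
        ((0 : Int), (0 : Int))).1
        = ((vals[k]'hkv).map (fun a => cpI a (vals[vals.length - 1 - k]'hkr))).sum := by
      rw [mergeFold_eq (hsorted _ hkr) _ (hsorted _ hkv) 0 0 le_rfl
        (fun a _ => cpI_nonneg a _)]
      ring
    -- A's sorted(best_case) is best_case itself: combinations are increasing
    have hcase : PySem.List.sorted ((PySem.List.pyGet? cases (k : Int)).getD []) (fun x => x) false
        = cases[k]'hk := by
      have : PySem.List.pyGet? cases (k : Int) = some (cases[k]'hk) := by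
        simp [List.getElem?_eq_getElem hk]
      rw [this, Option.getD_some]
      exact PySem.List.sorted_eq_self_of_pairwise _ _
        ((hcs _ (List.getElem_mem hk)).imp le_of_lt)
    rw [hother, hbs, hcase, hmerge]

theorem main_eq (dice : List (List Int)) : solution dice = solution_alt dice := by
  have hcs : ∀ c ∈ PySem.List.combinations (PySem.List.pyRange 0 (dice.length : Int) 1)
      (dice.length / 2), c.Pairwise (· < ·) := by
    intro c hc
    exact (PySem.List.pairwise_lt_pyRange_one 0 (dice.length : Int)).sublist
      (PySem.List.sublist_of_mem_combinations hc)
  exact core dice _ hcs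

-- ===== VERDICT (by name: the statement is the Claim_ definition above) =====
theorem solution_spec : Claim_equal_solution := by
  intro dice _
  exact main_eq dice
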